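-- pv_equiv track=rewrite | github.com/OllieBlomfield/comp110-24s-workspace | lessons/garden/garden_helpers.py | lookup_by_kind_and_date
-- ===== SOURCE A (Python) =====
-- def lookup_by_kind_and_date(garden_dict_kind: dict[str, list[str]], garden_dict_date: dict[str, list[str]], kind: str, date: str) -> str:
--     """Searches through 2 dictionaries to find plants that are both in that date and type."""
--     valid_plants: list[str] = []
--     if kind in garden_dict_kind and date in garden_dict_date:
--         for pl1 in garden_dict_date[date]:
--             for pl2 in garden_dict_kind[kind]:
--                 if pl1 == pl2:
--                     valid_plants.append(pl1)
--
--     if len(valid_plants) > 0: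
--         return f"{kind}s to plant in {date}: {valid_plants}"
--     else:
--         return f"No {kind}s to plant in {date}."
-- ===== SOURCE B (Python) =====
-- def lookup_by_kind_and_date(garden_dict_kind: dict[str, list[str]], garden_dict_date: dict[str, list[str]], kind: str, date: str) -> str:
--     """Searches through 2 dictionaries to find plants that are both in that date and type."""
--     if kind not in garden_dict_kind or date not in garden_dict_date:
--         return f"No {kind}s to plant in {date}."
--     kind_list = garden_dict_kind[kind]
--
--     def matches(dates: list[str]) -> list[str]:
--         if not dates:
--             return []
--         return [dates[0]] * kind_list.count(dates[0]) + matches(dates[1:])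
--
--     valid_plants = matches(garden_dict_date[date])
--     if valid_plants:
--         return f"{kind}s to plant in {date}: {valid_plants}"
--     return f"No {kind}s to plant in {date}."
-- ===== Notes on version B (the rewrite author's own statement) =====
-- stated objective: alternative
-- what changed: Guard-style early return instead of A's nested ifs, and the plant list is built by structural recursion over the date list, each head contributing list.count copies from the kind list by one stdlib call, instead of A's iterative double loop that appends inside an inner element-by-element scan.
import Mathlib
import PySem

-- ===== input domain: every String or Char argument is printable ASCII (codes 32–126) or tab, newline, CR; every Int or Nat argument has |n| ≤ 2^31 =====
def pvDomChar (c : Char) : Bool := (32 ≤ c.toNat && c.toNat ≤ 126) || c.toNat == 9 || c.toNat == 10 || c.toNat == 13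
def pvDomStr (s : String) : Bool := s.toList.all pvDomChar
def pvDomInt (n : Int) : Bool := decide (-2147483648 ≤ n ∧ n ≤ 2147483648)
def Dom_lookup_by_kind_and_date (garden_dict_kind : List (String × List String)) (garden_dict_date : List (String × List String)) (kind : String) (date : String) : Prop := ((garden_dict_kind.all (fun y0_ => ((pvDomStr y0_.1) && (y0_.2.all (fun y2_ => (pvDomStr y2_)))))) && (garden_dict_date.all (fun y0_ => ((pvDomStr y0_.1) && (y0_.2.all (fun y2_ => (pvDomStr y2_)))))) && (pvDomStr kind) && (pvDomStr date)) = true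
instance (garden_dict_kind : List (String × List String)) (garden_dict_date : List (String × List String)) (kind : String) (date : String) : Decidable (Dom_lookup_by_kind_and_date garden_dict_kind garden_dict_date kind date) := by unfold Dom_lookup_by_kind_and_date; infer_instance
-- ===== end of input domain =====

-- B uses guard-style early return and builds the plant list by structural recursion over the
-- date list with one list.count call per head, instead of A's iterative nested append loop.

-- ===== PORT A =====
-- shared helper: Python's repr() of a str (exact for printable ASCII + tab/newline/CR)
def pyStrRepr (s : String) : String :=
  let cs := s.toList
  let q : Char := if cs.contains '\'' && !(cs.contains '"') then '"' else '\''
  let esc := cs.flatMap (fun c =>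
    if c = '\\' then ['\\', '\\']
    else if c = q then ['\\', q]
    else if c = '\t' then ['\\', 't']
    else if c = '\n' then ['\\', 'n']
    else if c = '\r' then ['\\', 'r']
    else [c])
  String.ofList (q :: esc ++ [q])

-- shared helper: Python's repr / f-string rendering of a list[str]
def pyListRepr (l : List String) : String :=
  "[" ++ PySem.Str.join ", " (l.map pyStrRepr) ++ "]"

def lookup_by_kind_and_date (garden_dict_kind : List (String × List String)) (garden_dict_date : List (String × List String)) (kind : String) (date : String) : String :=
  let dk := PySem.Dict.mk garden_dict_kind
  let dd := PySem.Dict.mk garden_dict_date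
  let valid_plants : List String :=
    if dk.contains kind && dd.contains date then
      ((dd.get? date).getD []).foldl (fun acc pl1 =>
        ((dk.get? kind).getD []).foldl (fun acc2 pl2 =>
          if pl1 == pl2 then acc2 ++ [pl1] else acc2) acc) []
    else []
  if valid_plants.length > 0 then
    kind ++ "s to plant in " ++ date ++ ": " ++ pyListRepr valid_plants
  else
    "No " ++ kind ++ "s to plant in " ++ date ++ "."

-- ===== PORT B =====
-- B's inner recursive helper 'matches': head contributes kind_list.count(head) copies
def lbkad_matches (kind_list : List String) : List String → List String
  | [] => []
  | p :: rest => List.replicate (PySem.List.count kind_list p) p ++ lbkad_matches kind_list rest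

def lookup_by_kind_and_date_alt (garden_dict_kind : List (String × List String)) (garden_dict_date : List (String × List String)) (kind : String) (date : String) : String :=
  if !((PySem.Dict.mk garden_dict_kind).contains kind) || !((PySem.Dict.mk garden_dict_date).contains date) then
    "No " ++ kind ++ "s to plant in " ++ date ++ "."
  else
    let kind_list := ((PySem.Dict.mk garden_dict_kind).get? kind).getD []
    let valid_plants := lbkad_matches kind_list (((PySem.Dict.mk garden_dict_date).get? date).getD [])
    if valid_plants ≠ [] then
      kind ++ "s to plant in " ++ date ++ ": " ++ pyListRepr valid_plants
    else
      "No " ++ kind ++ "s to plant in " ++ date ++ "."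

-- ===== PRECONDITION & SPEC =====
def Spec_lookup_by_kind_and_date (garden_dict_kind : List (String × List String)) (garden_dict_date : List (String × List String)) (kind : String) (date : String) (out : String) : Prop := out = lookup_by_kind_and_date_alt garden_dict_kind garden_dict_date kind date
instance (garden_dict_kind : List (String × List String)) (garden_dict_date : List (String × List String)) (kind : String) (date : String) (out : String) : Decidable (Spec_lookup_by_kind_and_date garden_dict_kind garden_dict_date kind date out) := by unfold Spec_lookup_by_kind_and_date; infer_instance

-- ===== CLAIM =====
def Claim_equal_lookup_by_kind_and_date : Prop := ∀ (garden_dict_kind : List (String × List String)) (garden_dict_date : List (String × List String)) (kind : String) (date : String), Dom_lookup_by_kind_and_date garden_dict_kind garden_dict_date kind date → Spec_lookup_by_kind_and_date garden_dict_kind garden_dict_date kind date (lookup_by_kind_and_date garden_dict_kind garden_dict_date kind date)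

-- ===== LEMMAS AND PROOFS =====

-- A's inner scan over the kind list appends pl1 once per equal element
theorem inner_fold (kl : List String) (p : String) (acc : List String) :
    kl.foldl (fun a q => if p == q then a ++ [p] else a) acc
      = acc ++ List.replicate (kl.count p) p := by
  induction kl generalizing acc with
  | nil => simp
  | cons q kl ih =>
    simp only [List.foldl_cons, ih, List.count_cons]
    by_cases h : p = q
    · simp [h, List.replicate_succ]
    · have h' : (q == p) = false := by simp [Ne.symm h]
      simp [h, h']

-- A's outer fold equals B's recursive matches
theorem foldl_eq_matches (kl dl : List String) (acc : List String) :
    dl.foldl (fun acc pl1 => kl.foldl (fun a q => if pl1 == q then a ++ [pl1] else a) acc) acc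
      = acc ++ lbkad_matches kl dl := by
  induction dl generalizing acc with
  | nil => simp [lbkad_matches]
  | cons p dl ih =>
    rw [List.foldl_cons, inner_fold, ih]
    simp [lbkad_matches, PySem.List.count_eq]

-- ===== VERDICT =====
theorem lookup_by_kind_and_date_spec : Claim_equal_lookup_by_kind_and_date := by
  intro gk gd kind date _
  unfold Spec_lookup_by_kind_and_date lookup_by_kind_and_date lookup_by_kind_and_date_alt
  by_cases hk : (PySem.Dict.mk gk).contains kind = true
  · by_cases hd : (PySem.Dict.mk gd).contains date = true
    · simp only [hk, hd, Bool.and_self, Bool.not_true, Bool.or_self, Bool.false_or, if_true,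
        Bool.false_eq_true, if_false]
      rw [foldl_eq_matches, List.nil_append]
      by_cases h : lbkad_matches (((PySem.Dict.mk gk).get? kind).getD []) (((PySem.Dict.mk gd).get? date).getD []) = []
      · simp [h]
      · simp [h, List.length_pos_iff_ne_nil.mpr h]
    · simp [hk, hd]
  · simp [hk]
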